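-- pv_equiv track=rewrite | github.com/Deltams/dm-tasks | task3/task2.py | check_vector
-- ===== SOURCE A (Python) =====
-- def what_degree_two(number): # В какую степень двойки возведено число; -1: не является степенью двойки
--     tmp = 1
--     ans = 0
--     while tmp < number:
--         tmp *= 2
--         ans += 1
--     if number == tmp:
--         return ans
--     else:
--         return -1
--
-- def check_vector(vec):
--     if len(vec) < 2:
--         return False
--     if what_degree_two(len(vec)) == -1:
--         return False
--     for char in vec:
--         if "0"<= char <= "1":
--             continue
--         return False
--     return True
-- ===== SOURCE B (Python) =====
-- def check_vector(vec):
--     n = len(vec)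
--     return n >= 2 and (n & (n - 1)) == 0 and all("0" <= char <= "1" for char in vec)
-- ===== Notes on version B (the rewrite author's own statement) =====
-- stated objective: simpler
-- what changed: Replaces the iterative-doubling helper what_degree_two (a while loop counting the exponent) by the closed-form bit trick n & (n-1) == 0 with the n >= 2 guard, and folds the whole check into a single boolean expression with all(); the character test keeps A's exact lexicographic range comparison.
import Mathlib
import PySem

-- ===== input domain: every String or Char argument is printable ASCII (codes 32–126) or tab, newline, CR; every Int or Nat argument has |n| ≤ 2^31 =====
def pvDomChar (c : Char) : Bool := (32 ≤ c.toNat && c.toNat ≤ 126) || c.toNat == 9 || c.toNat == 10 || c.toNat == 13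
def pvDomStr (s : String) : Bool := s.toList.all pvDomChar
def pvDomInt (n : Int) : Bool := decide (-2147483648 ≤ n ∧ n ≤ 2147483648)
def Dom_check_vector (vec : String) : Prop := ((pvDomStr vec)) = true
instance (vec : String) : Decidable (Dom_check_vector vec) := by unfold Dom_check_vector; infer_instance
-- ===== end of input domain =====

-- B replaces A's iterative-doubling power-of-two helper by the closed-form bit trick
-- n &&& (n-1) == 0 (with the 2 ≤ n guard) and a single all-chars scan; objective: simpler.

-- ===== PORT A =====
-- while tmp < number: tmp *= 2; ans += 1   (tmp starts at 1, so 0 < tmp throughout)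
def wdtLoop (number tmp ans : Int) (h : 0 < tmp) : Int × Int :=
  if _htn : tmp < number then wdtLoop number (tmp * 2) (ans + 1) (by omega)
  else (tmp, ans)
termination_by (number - tmp).toNat
decreasing_by omega

def what_degree_two (number : Int) : Int :=
  let r := wdtLoop number 1 0 (by norm_num)
  if number = r.1 then r.2 else -1

-- the for-loop over the characters with its early return False
def checkCharsA : List Char → Bool
  | [] => true
  | c :: rest => if '0' ≤ c ∧ c ≤ '1' then checkCharsA rest else false

def check_vector (vec : String) : Bool :=
  if PySem.Str.len vec < 2 then false
  else if what_degree_two (PySem.Str.len vec) = -1 then false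
  else checkCharsA vec.toList

-- ===== PORT B =====
def check_vector_alt (vec : String) : Bool :=
  let n := vec.toList.length
  decide (2 ≤ n) && (n &&& (n - 1) == 0) && vec.toList.all (fun c => decide ('0' ≤ c ∧ c ≤ '1'))

-- ===== PRECONDITION & SPEC =====
def Spec_check_vector (vec : String) (out : Bool) : Prop := out = check_vector_alt vec
instance (vec : String) (out : Bool) : Decidable (Spec_check_vector vec out) := by unfold Spec_check_vector; infer_instance

-- ===== CLAIM (what is proved, stated in full; the proofs are below) =====
def Claim_equal_check_vector : Prop := ∀ (vec : String), Dom_check_vector vec → Spec_check_vector vec (check_vector vec)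

-- ===== LEMMAS AND PROOFS =====

theorem what_degree_two_eq (number : Int) :
    what_degree_two number =
      if number = (wdtLoop number 1 0 (by norm_num)).1
      then (wdtLoop number 1 0 (by norm_num)).2 else -1 := rfl

theorem and_div2 (x y : ℕ) : (x &&& y) / 2 = x / 2 &&& y / 2 := by
  apply Nat.eq_of_testBit_eq; intro i
  simp [Nat.testBit_div_two, Nat.testBit_and]

theorem and_two_mul (a : ℕ) (h : 0 < a) : (2 * a) &&& (2 * a - 1) = 2 * (a &&& (a - 1)) := by
  apply Nat.eq_of_testBit_eq
  intro i
  cases i with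
  | zero => simp [Nat.testBit_zero]
  | succ j =>
      simp only [Nat.testBit_add_one, and_div2]
      rw [Nat.mul_div_cancel_left _ (by norm_num : 0 < 2),
          Nat.mul_div_cancel_left _ (by norm_num : 0 < 2),
          show (2 * a - 1) / 2 = a - 1 by omega]

theorem and_odd (b : ℕ) : (2 * b + 1) &&& (2 * b) = 2 * b := by
  apply Nat.eq_of_testBit_eq
  intro i
  cases i with
  | zero => simp [Nat.testBit_zero]
  | succ j =>
      simp only [Nat.testBit_add_one, and_div2]
      rw [show (2 * b + 1) / 2 = b by omega, Nat.mul_div_cancel_left _ (by norm_num : 0 < 2),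
          Nat.and_self]

theorem pow2_iff : ∀ n : ℕ, 1 ≤ n → (n &&& (n - 1) = 0 ↔ ∃ k : ℕ, n = 2 ^ k) := by
  intro n
  induction n using Nat.strong_induction_on with
  | _ n ih =>
    intro h1
    rcases Nat.even_or_odd n with ⟨a, ha⟩ | ⟨b, hb⟩
    · have ha' : n = 2 * a := by omega
      subst ha'
      rw [and_two_mul a (by omega)]
      constructor
      · intro h0
        obtain ⟨k, hk⟩ := (ih a (by omega) (by omega)).1 (by omega)
        exact ⟨k + 1, by rw [hk]; ring⟩
      · rintro ⟨k, hk⟩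
        cases k with
        | zero => omega
        | succ m =>
          have hm : a = 2 ^ m := by rw [pow_succ] at hk; omega
          have := (ih a (by omega) (by omega)).2 ⟨m, hm⟩
          omega
    · subst hb
      rw [show 2 * b + 1 - 1 = 2 * b by omega, and_odd]
      constructor
      · intro h0; exact ⟨0, by omega⟩
      · rintro ⟨k, hk⟩
        cases k with
        | zero => omega
        | succ m => rw [pow_succ] at hk; omega

theorem wdtLoop_pow (number tmp ans : Int) (h : 0 < tmp) :
    ∀ e : ℕ, tmp = 2 ^ e → ∃ k : ℕ, (wdtLoop number tmp ans h).1 = 2 ^ k := by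
  fun_induction wdtLoop number tmp ans h with
  | case1 a b c hlt ih =>
      intro e he
      exact ih (e + 1) (by rw [he, pow_succ])
  | case2 a b c hge =>
      intro e he
      exact ⟨e, he⟩

theorem wdtLoop_reach (number tmp ans : Int) (h : 0 < tmp) :
    ∀ e k : ℕ, tmp = 2 ^ e → number = 2 ^ k → e ≤ k →
      (wdtLoop number tmp ans h).1 = number := by
  fun_induction wdtLoop number tmp ans h with
  | case1 a b c hlt ih =>
      intro e k he hn hek
      have hlt' : e < k := by
        by_contra hc
        have h1 : (2 : Int) ^ k ≤ 2 ^ e := pow_le_pow_right₀ (by norm_num) (by omega)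
        rw [he, hn] at hlt
        omega
      exact ih (e + 1) k (by rw [he, pow_succ]) hn (by omega)
  | case2 a b c hge =>
      intro e k he hn hek
      have h1 : (2 : Int) ^ e ≤ 2 ^ k := pow_le_pow_right₀ (by norm_num) hek
      rw [he, hn] at hge ⊢
      simp only []
      omega

theorem wdtLoop_ans_nonneg (number tmp ans : Int) (h : 0 < tmp) :
    0 ≤ ans → 0 ≤ (wdtLoop number tmp ans h).2 := by
  fun_induction wdtLoop number tmp ans h with
  | case1 a b c hlt ih => intro ha; exact ih (by omega)
  | case2 a b c hge => intro ha; exact ha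

theorem wdt_neg_one_iff (n : Int) (hn : 2 ≤ n) :
    (what_degree_two n = -1) ↔ ¬ ∃ k : ℕ, n = 2 ^ k := by
  rw [what_degree_two_eq]
  split_ifs with hEq
  · have h2 := wdtLoop_ans_nonneg n 1 0 (by norm_num) (by norm_num)
    obtain ⟨k, hk⟩ := wdtLoop_pow n 1 0 (by norm_num) 0 (by norm_num)
    constructor
    · intro hcontra; omega
    · intro hcontra; exact absurd ⟨k, by rw [hEq, hk]⟩ hcontra
  · constructor
    · rintro - ⟨k, hk⟩
      exact hEq (wdtLoop_reach n 1 0 (by norm_num) 0 k (by norm_num) hk (by omega)).symm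
    · intro _; rfl

theorem checkCharsA_eq (l : List Char) :
    checkCharsA l = l.all (fun c => decide ('0' ≤ c ∧ c ≤ '1')) := by
  induction l with
  | nil => rfl
  | cons c rest ih =>
      simp only [checkCharsA, List.all_cons]
      split_ifs with hc
      · simp [hc, ih]
      · simp [hc]

theorem int_pow2_iff (m : ℕ) : (∃ k : ℕ, (m : Int) = 2 ^ k) ↔ ∃ k : ℕ, m = 2 ^ k := by
  constructor
  · rintro ⟨k, hk⟩
    exact ⟨k, by exact_mod_cast hk⟩
  · rintro ⟨k, hk⟩
    exact ⟨k, by exact_mod_cast hk⟩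

-- ===== VERDICT (by name: the statement is the Claim_ definition above) =====
theorem check_vector_spec : Claim_equal_check_vector := by
  intro vec _
  unfold Spec_check_vector check_vector check_vector_alt
  rw [PySem.Str.len_eq]
  set m := vec.toList.length with hm
  by_cases hlt : (m : Int) < 2
  · have : ¬ 2 ≤ m := by omega
    simp [hlt, this]
  · have h2 : 2 ≤ m := by omega
    rw [if_neg hlt]
    by_cases hp : ∃ k : ℕ, m = 2 ^ k
    · have hnot : ¬ (what_degree_two (m : Int) = -1) := by
        rw [wdt_neg_one_iff _ (by omega), not_not, int_pow2_iff]
        exact hp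
      have hbit : m &&& (m - 1) = 0 := (pow2_iff m (by omega)).2 hp
      rw [if_neg hnot, checkCharsA_eq]
      simp [h2, hbit]
    · have hyes : what_degree_two (m : Int) = -1 := by
        rw [wdt_neg_one_iff _ (by omega), int_pow2_iff]
        exact hp
      have hbit : ¬ (m &&& (m - 1) = 0) := fun hc => hp ((pow2_iff m (by omega)).1 hc)
      simp [hyes, h2, hbit]
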